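-- pv_equiv track=rewrite | github.com/gamalamadingdong/TWX | data_processing/parse_cve.py | infer_cwe_from_description
-- ===== SOURCE A (Python) =====
-- from typing import Dict, List, Any, Optional
--
-- def infer_cwe_from_description(description: str) -> List[str]:
--     """
--     Infer likely CWE IDs when explicit CWE information is not provided.
--     Used as a fallback for CVEs without CWE mappings.
--     """
--     if not description:
--         return []
--
--     description = description.lower()
--     inferred_cwes = []
--
--     # Map keywords to CWE IDs - ordered by specificity
--     keyword_cwe_map = {
--         # SQL Injection patterns
--         'sql injection': 'CWE-89',
--         'sqli ': 'CWE-89',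
--         'sql command': 'CWE-89',
--
--         # XSS patterns
--         'cross-site scripting': 'CWE-79',
--         'cross site scripting': 'CWE-79',
--         'xss': 'CWE-79',
--
--         # Command Injection
--         'command injection': 'CWE-78',
--         'os command': 'CWE-78',
--         'shell injection': 'CWE-78',
--
--         # Path Traversal
--         'path traversal': 'CWE-22',
--         'directory traversal': 'CWE-22',
--         'file inclusion': 'CWE-98',
--
--         # Memory Safety
--         'buffer overflow': 'CWE-120',
--         'stack overflow': 'CWE-121',
--         'heap overflow': 'CWE-122',
--         'use after free': 'CWE-416',
--         'null pointer': 'CWE-476',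
--
--         # Authentication
--         'authentication bypass': 'CWE-287',
--         'hardcoded password': 'CWE-798',
--         'weak password': 'CWE-521',
--
--         # Information Disclosure
--         'information disclosure': 'CWE-200',
--         'sensitive information': 'CWE-200',
--
--         # Access Control
--         'improper authorization': 'CWE-285',
--         'improper access control': 'CWE-284',
--         'privilege escalation': 'CWE-269',
--     }
--
--     for keyword, cwe_id in keyword_cwe_map.items():
--         if keyword in description and cwe_id not in inferred_cwes:
--             inferred_cwes.append(cwe_id)
--
--     return inferred_cwes
-- ===== SOURCE B (Python) =====
-- def infer_cwe_from_description(description):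
--     """
--     Infer likely CWE IDs when explicit CWE information is not provided.
--     Grouped synonym lists per CWE (in A's first-appearance order) make the
--     explicit 'not in' dedup scan unnecessary.
--     """
--     if not description:
--         return []
--     d = description.lower()
--     cwe_groups = [
--         ('CWE-89', ['sql injection', 'sqli ', 'sql command']),
--         ('CWE-79', ['cross-site scripting', 'cross site scripting', 'xss']),
--         ('CWE-78', ['command injection', 'os command', 'shell injection']),
--         ('CWE-22', ['path traversal', 'directory traversal']),
--         ('CWE-98', ['file inclusion']),
--         ('CWE-120', ['buffer overflow']),
--         ('CWE-121', ['stack overflow']),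
--         ('CWE-122', ['heap overflow']),
--         ('CWE-416', ['use after free']),
--         ('CWE-476', ['null pointer']),
--         ('CWE-287', ['authentication bypass']),
--         ('CWE-798', ['hardcoded password']),
--         ('CWE-521', ['weak password']),
--         ('CWE-200', ['information disclosure', 'sensitive information']),
--         ('CWE-285', ['improper authorization']),
--         ('CWE-284', ['improper access control']),
--         ('CWE-269', ['privilege escalation']),
--     ]
--     return [cwe for cwe, kws in cwe_groups if any(kw in d for kw in kws)]
-- ===== Notes on version B (the rewrite author's own statement) =====
-- stated objective: simpler
-- what changed: Replaced the flat keyword-to-CWE dict walk with its explicit dedup membership scan of the result list by an ordered list of (cwe, synonyms) groups and a single filter with any(), so the dedup scan disappears.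
import Mathlib
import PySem

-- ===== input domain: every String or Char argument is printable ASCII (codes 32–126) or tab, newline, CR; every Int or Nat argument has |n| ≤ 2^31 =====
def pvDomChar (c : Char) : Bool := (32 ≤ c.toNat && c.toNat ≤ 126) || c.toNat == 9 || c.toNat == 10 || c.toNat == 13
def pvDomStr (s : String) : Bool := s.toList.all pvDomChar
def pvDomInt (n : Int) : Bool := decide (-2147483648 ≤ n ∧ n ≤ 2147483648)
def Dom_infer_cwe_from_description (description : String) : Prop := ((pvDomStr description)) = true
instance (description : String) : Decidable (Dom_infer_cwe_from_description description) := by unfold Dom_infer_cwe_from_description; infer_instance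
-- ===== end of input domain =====

-- B groups the same keyword→CWE pairs per CWE (keywords of each CWE are contiguous in A's dict,
-- groups in first-appearance order) and filters with any(), eliminating A's explicit dedup scan.

-- ===== PORT A =====
-- A's keyword_cwe_map, as the (keyword, cwe_id) pairs in dict insertion order
def pvPairsA : List (String × String) :=
  [("sql injection", "CWE-89"), ("sqli ", "CWE-89"), ("sql command", "CWE-89"),
   ("cross-site scripting", "CWE-79"), ("cross site scripting", "CWE-79"), ("xss", "CWE-79"),
   ("command injection", "CWE-78"), ("os command", "CWE-78"), ("shell injection", "CWE-78"),
   ("path traversal", "CWE-22"), ("directory traversal", "CWE-22"), ("file inclusion", "CWE-98"),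
   ("buffer overflow", "CWE-120"), ("stack overflow", "CWE-121"), ("heap overflow", "CWE-122"),
   ("use after free", "CWE-416"), ("null pointer", "CWE-476"),
   ("authentication bypass", "CWE-287"), ("hardcoded password", "CWE-798"), ("weak password", "CWE-521"),
   ("information disclosure", "CWE-200"), ("sensitive information", "CWE-200"),
   ("improper authorization", "CWE-285"), ("improper access control", "CWE-284"),
   ("privilege escalation", "CWE-269")]

-- loop body: if keyword in description and cwe_id not in inferred_cwes: inferred_cwes.append(cwe_id)
def pvStepA (d : String) (acc : List String) (p : String × String) : List String :=
  if PySem.Str.isIn p.1 d && !(acc.contains p.2) then acc ++ [p.2] else acc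

def infer_cwe_from_description (description : String) : List String :=
  if description = "" then []
  else pvPairsA.foldl (pvStepA (PySem.Str.lower description)) []

-- ===== PORT B =====
def pvGroupsB : List (String × List String) :=
  [("CWE-89", ["sql injection", "sqli ", "sql command"]),
   ("CWE-79", ["cross-site scripting", "cross site scripting", "xss"]),
   ("CWE-78", ["command injection", "os command", "shell injection"]),
   ("CWE-22", ["path traversal", "directory traversal"]),
   ("CWE-98", ["file inclusion"]),
   ("CWE-120", ["buffer overflow"]),
   ("CWE-121", ["stack overflow"]),
   ("CWE-122", ["heap overflow"]),
   ("CWE-416", ["use after free"]),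
   ("CWE-476", ["null pointer"]),
   ("CWE-287", ["authentication bypass"]),
   ("CWE-798", ["hardcoded password"]),
   ("CWE-521", ["weak password"]),
   ("CWE-200", ["information disclosure", "sensitive information"]),
   ("CWE-285", ["improper authorization"]),
   ("CWE-284", ["improper access control"]),
   ("CWE-269", ["privilege escalation"])]

-- [cwe for cwe, kws in cwe_groups if any(kw in d for kw in kws)]
def infer_cwe_from_description_alt (description : String) : List String :=
  if description = "" then []
  else
    let d := PySem.Str.lower description
    (pvGroupsB.filter (fun g => g.2.any (fun kw => PySem.Str.isIn kw d))).map Prod.fst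

-- ===== PRECONDITION & SPEC =====
def Spec_infer_cwe_from_description (description : String) (out : List String) : Prop := out = infer_cwe_from_description_alt description
instance (description : String) (out : List String) : Decidable (Spec_infer_cwe_from_description description out) := by unfold Spec_infer_cwe_from_description; infer_instance

-- ===== CLAIM (what is proved, stated in full; the proofs are below) =====
def Claim_equal_infer_cwe_from_description : Prop := ∀ (description : String), Dom_infer_cwe_from_description description → Spec_infer_cwe_from_description description (infer_cwe_from_description description)

-- ===== LEMMAS AND PROOFS =====

-- once a cwe is in the accumulator, the rest of its keyword group changes nothing
lemma foldA_mem (d c : String) (kws : List String) (acc : List String) (h : c ∈ acc) :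
    (kws.map (fun k => (k, c))).foldl (pvStepA d) acc = acc := by
  induction kws with
  | nil => rfl
  | cons k kws ih =>
      simp only [List.map_cons, List.foldl_cons]
      have : pvStepA d acc (k, c) = acc := by
        simp [pvStepA, h]
      rw [this, ih]

-- processing one whole keyword group from an accumulator not containing its cwe
lemma foldA_group (d c : String) (kws : List String) (acc : List String) (h : c ∉ acc) :
    (kws.map (fun k => (k, c))).foldl (pvStepA d) acc
      = if kws.any (fun kw => PySem.Str.isIn kw d) then acc ++ [c] else acc := by
  induction kws with
  | nil => simp
  | cons k kws ih =>
      simp only [List.map_cons, List.foldl_cons, List.any_cons]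
      by_cases hk : PySem.Str.isIn k d = true
      · have hstep : pvStepA d acc (k, c) = acc ++ [c] := by
          simp only [pvStepA]; rw [hk]; simp [h]
        rw [hstep, foldA_mem d c kws _ (by simp)]
        simp only [hk, Bool.true_or, if_pos]
      · have hkf : PySem.Str.isIn k d = false := by
          exact Bool.not_eq_true _ ▸ (by simpa using hk)
        have hstep : pvStepA d acc (k, c) = acc := by
          simp only [pvStepA]; rw [hkf]; simp
        rw [hstep, ih]
        simp only [hkf, Bool.false_or]

-- A's flat fold over the concatenated groups equals B's filter, given distinct fresh cwes
lemma foldA_groups (d : String) (groups : List (String × List String)) (acc : List String)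
    (hdis : ∀ c ∈ groups.map Prod.fst, c ∉ acc) (hnd : (groups.map Prod.fst).Nodup) :
    (groups.flatMap (fun g => g.2.map (fun k => (k, g.1)))).foldl (pvStepA d) acc
      = acc ++ (groups.filter (fun g => g.2.any (fun kw => PySem.Str.isIn kw d))).map Prod.fst := by
  induction groups generalizing acc with
  | nil => simp
  | cons g gs ih =>
      obtain ⟨c, kws⟩ := g
      simp only [List.flatMap_cons, List.foldl_append]
      have hc : c ∉ acc := hdis c (by simp)
      rw [foldA_group d c kws acc hc]
      simp only [List.map_cons, List.nodup_cons] at hnd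
      by_cases hm : kws.any (fun kw => PySem.Str.isIn kw d) = true
      · rw [if_pos hm, ih (acc ++ [c])
          (by
            intro c' hc'
            simp only [List.mem_append, List.mem_singleton]
            rintro (h1 | rfl)
            · exact hdis c' (by simp [hc']) h1
            · exact hnd.1 hc')
          hnd.2,
          List.filter_cons_of_pos (by exact hm), List.map_cons]
        simp
      · rw [if_neg hm, ih acc (fun c' hc' => hdis c' (by simp [hc'])) hnd.2,
          List.filter_cons_of_neg (by exact hm)]

-- ===== VERDICT (by name: the statement is the Claim_ definition above) =====
theorem infer_cwe_from_description_spec : Claim_equal_infer_cwe_from_description := by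
  intro description _
  unfold Spec_infer_cwe_from_description infer_cwe_from_description infer_cwe_from_description_alt
  by_cases h : description = ""
  · simp [h]
  · rw [if_neg h, if_neg h]
    have hlist : pvPairsA = pvGroupsB.flatMap (fun g => g.2.map (fun k => (k, g.1))) := by rfl
    rw [hlist, foldA_groups _ pvGroupsB [] (by simp) (by decide)]
    simp [pvGroupsB]
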